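-- pv_equiv track=rewrite | github.com/mitzerh/python-js-doc | modules/StringHelper.py | fullStrip
-- ===== SOURCE A (Python) =====
-- def fullStrip(str, newlines_only = None):
-- 	sp = []
--
-- 	if newlines_only:
-- 		str = str.strip(' \n\r')
-- 	else:
-- 		str = str.strip(' \t\n\r')
--
-- 	for i, s in enumerate(str.split(' ')):
-- 		if len(s) > 0:
-- 			sp.append(s)
--
-- 	return ' '.join(sp)
-- ===== SOURCE B (Python) =====
-- def fullStrip(str, newlines_only = None):
-- 	if newlines_only:
-- 		s = str.strip(' \n\r')
-- 	else:
-- 		s = str.strip(' \t\n\r')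
--
-- 	out = []
-- 	pending = False
-- 	for c in s:
-- 		if c == ' ':
-- 			pending = True
-- 		else:
-- 			if pending and out:
-- 				out.append(' ')
-- 			out.append(c)
-- 			pending = False
-- 	return ''.join(out)
-- ===== Notes on version B (the rewrite author's own statement) =====
-- stated objective: alternative
-- what changed: B replaces A's strip + split-on-space + filter-nonempty + join pipeline with a single character-level pass over the stripped string that collapses runs of spaces using a pending-space flag, never materialising the list of fragments.
import Mathlib
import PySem

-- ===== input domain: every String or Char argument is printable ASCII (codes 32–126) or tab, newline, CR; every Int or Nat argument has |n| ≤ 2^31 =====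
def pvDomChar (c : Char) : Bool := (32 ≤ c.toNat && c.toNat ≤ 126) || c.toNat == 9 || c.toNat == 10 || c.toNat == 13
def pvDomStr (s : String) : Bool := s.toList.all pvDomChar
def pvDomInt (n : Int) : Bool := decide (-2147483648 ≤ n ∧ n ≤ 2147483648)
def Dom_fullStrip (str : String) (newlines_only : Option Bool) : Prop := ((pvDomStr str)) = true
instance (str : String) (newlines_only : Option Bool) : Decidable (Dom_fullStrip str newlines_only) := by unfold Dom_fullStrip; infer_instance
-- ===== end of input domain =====

-- B replaces A's strip/split(' ')/filter/join pipeline by a single character pass that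
-- collapses runs of spaces with a pending flag (alternative decomposition, same cost).


-- ===== PORT A =====
-- literal port: strip the chosen char set, split on ' ', keep the non-empty pieces
-- (loop over enumerate, appending), join with ' '.
def fullStrip (str : String) (newlines_only : Option Bool) : String :=
  let sp : List String := []
  let s : String :=
    if newlines_only.getD false then PySem.Str.stripChars str " \n\r"
    else PySem.Str.stripChars str " \t\n\r"
  -- s.split(' ') : single-char separator, never raises
  let parts : List String := (PySem.Chars.splitOn s.toList " ".toList).map String.ofList
  let sp : List String :=
    (PySem.List.enumerate parts).foldl
      (fun acc p => if 0 < PySem.Str.len p.2 then acc ++ [p.2] else acc) sp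
  PySem.Str.join " " sp

-- ===== PORT B =====
-- literal port of Source B: one pass with (out, pending) state, joining out at the end.
def fullStrip_alt (str : String) (newlines_only : Option Bool) : String :=
  let s : String :=
    if newlines_only.getD false then PySem.Str.stripChars str " \n\r"
    else PySem.Str.stripChars str " \t\n\r"
  let st : List Char × Bool :=
    s.toList.foldl
      (fun (st : List Char × Bool) c =>
        if c = ' ' then (st.1, true)
        else ((if st.2 && !st.1.isEmpty then st.1 ++ [' '] else st.1) ++ [c], false))
      ([], false)
  String.ofList st.1

-- ===== PRECONDITION & SPEC =====
def Spec_fullStrip (str : String) (newlines_only : Option Bool) (out : String) : Prop := out = fullStrip_alt str newlines_only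
instance (str : String) (newlines_only : Option Bool) (out : String) : Decidable (Spec_fullStrip str newlines_only out) := by unfold Spec_fullStrip; infer_instance

-- ===== CLAIM (what is proved, stated in full; the proofs are below) =====
def Claim_equal_fullStrip : Prop := ∀ (str : String) (newlines_only : Option Bool), Dom_fullStrip str newlines_only → Spec_fullStrip str newlines_only (fullStrip str newlines_only)

-- ===== LEMMAS AND PROOFS =====

-- spec of split(' ') on char lists
def pvSplitSp : List Char → List (List Char)
  | [] => [[]]
  | c :: cs => if c = ' ' then [] :: pvSplitSp cs else (pvSplitSp cs).modifyHead (c :: ·)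

-- the words A keeps, and A's result on the stripped char list
def pvWords (cs : List Char) : List (List Char) := (pvSplitSp cs).filter (fun w => !w.isEmpty)
def pvJ (cs : List Char) : List Char := PySem.Chars.join [' '] (pvWords cs)

-- B's one-pass collapse as a structural recursion (pending, started)
def pvF : List Char → Bool → Bool → List Char
  | [], _, _ => []
  | c :: cs, p, st =>
    if c = ' ' then pvF cs true st
    else (if p && st then [' ', c] else [c]) ++ pvF cs false true

theorem pvSplitSp_ne_nil (cs : List Char) : pvSplitSp cs ≠ [] := by
  cases cs with
  | nil => simp [pvSplitSp]
  | cons c cs =>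
      simp only [pvSplitSp]
      split
      · simp
      · cases h : pvSplitSp cs with
        | nil => exact absurd h (pvSplitSp_ne_nil cs)
        | cons a t => simp [h]

theorem pv_go_spec (fuel : Nat) (l cur : List Char) (acc : List (List Char)) (h : l.length < fuel) :
    PySem.Chars.splitOn.go [' '] fuel l cur acc
      = acc.reverse ++ (pvSplitSp l).modifyHead (cur.reverse ++ ·) := by
  induction fuel generalizing l cur acc with
  | zero => omega
  | succ fuel ih =>
      cases l with
      | nil => simp [PySem.Chars.splitOn.go, pvSplitSp]
      | cons c rest =>
          by_cases hc : c = ' '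
          · subst hc
            rw [show PySem.Chars.splitOn.go [' '] (fuel+1) (' ' :: rest) cur acc
                  = PySem.Chars.splitOn.go [' '] fuel rest [] (cur.reverse :: acc) from by
                  simp [PySem.Chars.splitOn.go, List.isPrefixOf]]
            rw [ih rest [] (cur.reverse :: acc) (by simp at h ⊢; omega)]
            simp only [pvSplitSp, if_pos rfl]
            cases pvSplitSp rest <;> simp
          · rw [show PySem.Chars.splitOn.go [' '] (fuel+1) (c :: rest) cur acc
                  = PySem.Chars.splitOn.go [' '] fuel rest (c :: cur) acc from by
                  simp only [PySem.Chars.splitOn.go, List.isPrefixOf]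
                  rw [if_neg (by simp [Ne.symm hc])]]
            rw [ih rest (c :: cur) acc (by simp at h ⊢; omega)]
            simp only [pvSplitSp, if_neg hc]
            obtain ⟨a, t, ht⟩ : ∃ a t, pvSplitSp rest = a :: t := by
              cases hh : pvSplitSp rest with
              | nil => exact absurd hh (pvSplitSp_ne_nil rest)
              | cons a t => exact ⟨a, t, rfl⟩
            simp [ht]

theorem pv_splitOn_eq (cs : List Char) : PySem.Chars.splitOn cs [' '] = pvSplitSp cs := by
  rw [PySem.Chars.splitOn, pv_go_spec (cs.length + 1) cs [] [] (by omega)]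
  cases pvSplitSp cs <;> simp

theorem pv_join_eq_nil_iff (ws : List (List Char)) (h : ∀ w ∈ ws, w ≠ []) :
    PySem.Chars.join [' '] ws = [] ↔ ws = [] := by
  cases ws with
  | nil => simp [PySem.Chars.join_nil]
  | cons w ws =>
      have hw : w ≠ [] := h w (by simp)
      cases ws with
      | nil => simp [PySem.Chars.join_singleton, hw]
      | cons q rest => simp [PySem.Chars.join_cons_cons, hw]

theorem pvWords_ne_nil (cs : List Char) : ∀ w ∈ pvWords cs, w ≠ [] := by
  intro w hw
  simp only [pvWords, List.mem_filter] at hw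
  simpa using hw.2

theorem pvJ_space (cs : List Char) : pvJ (' ' :: cs) = pvJ cs := by
  simp [pvJ, pvWords, pvSplitSp]

theorem pvJ_cons (c : Char) (cs : List Char) (hc : c ≠ ' ') :
    pvJ (c :: cs)
      = c :: ((if decide (cs.head? = some ' ') && !(pvJ cs).isEmpty then [' '] else [])
          ++ pvJ cs) := by
  cases cs with
  | nil => simp [pvJ, pvWords, pvSplitSp, hc, PySem.Chars.join_singleton, PySem.Chars.join_nil]
  | cons c' cs' =>
      by_cases hc' : c' = ' '
      · subst hc'
        have hsp : pvSplitSp (' ' :: cs') = [] :: pvSplitSp cs' := by simp [pvSplitSp]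
        have hJ : pvJ (' ' :: cs') = pvJ cs' := pvJ_space cs'
        have hw : pvWords (' ' :: cs') = pvWords cs' := by simp [pvWords, hsp]
        have hsp2 : pvSplitSp (c :: ' ' :: cs') = [c] :: pvSplitSp cs' := by
          simp [pvSplitSp, hc, hsp]
        have hw2 : pvWords (c :: ' ' :: cs') = [c] :: pvWords cs' := by
          simp [pvWords, hsp2]
        rw [hJ]
        rw [show decide ((' ' :: cs').head? = some ' ') = true from by simp]
        cases hws : pvWords cs' with
        | nil =>
            have h0 : pvJ cs' = [] := by simp [pvJ, hws, PySem.Chars.join_nil]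
            simp [pvJ, hw2, hws, PySem.Chars.join_singleton]
        | cons q rest =>
            have hne : pvJ cs' ≠ [] := by
              rw [pvJ]
              intro hx
              exact absurd ((pv_join_eq_nil_iff _ (pvWords_ne_nil cs')).1 hx) (by simp [hws])
            rw [if_pos (by simp [List.isEmpty_eq_false_iff, hne])]
            simp [pvJ, hw2, hws, PySem.Chars.join_cons_cons]
      · obtain ⟨h, t, hht⟩ : ∃ h t, pvSplitSp cs' = h :: t := by
          cases hh : pvSplitSp cs' with
          | nil => exact absurd hh (pvSplitSp_ne_nil cs')
          | cons a t => exact ⟨a, t, rfl⟩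
        have hsp : pvSplitSp (c' :: cs') = (c' :: h) :: t := by simp [pvSplitSp, hc', hht]
        have hsp2 : pvSplitSp (c :: c' :: cs') = (c :: c' :: h) :: t := by
          rw [show pvSplitSp (c :: c' :: cs')
                = List.modifyHead (c :: ·) (pvSplitSp (c' :: cs')) from by
                simp [pvSplitSp, hc], hsp]
          simp
        have hw : pvWords (c' :: cs') = (c' :: h) :: t.filter (fun w => !w.isEmpty) := by
          simp [pvWords, hsp]
        have hw2 : pvWords (c :: c' :: cs') = (c :: c' :: h) :: t.filter (fun w => !w.isEmpty) := by
          simp [pvWords, hsp2]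
        rw [if_neg (by simp [hc'])]
        cases hft : t.filter (fun w => !w.isEmpty) with
        | nil => simp [pvJ, hw, hw2, hft, PySem.Chars.join_singleton]
        | cons q rest =>
            simp [pvJ, hw, hw2, hft, PySem.Chars.join_cons_cons]

theorem pvF_spec (cs : List Char) (p st : Bool) :
    pvF cs p st
      = (if st && (p || decide (cs.head? = some ' ')) && !(pvJ cs).isEmpty then [' '] else [])
          ++ pvJ cs := by
  induction cs generalizing p st with
  | nil => simp [pvF, pvJ, pvWords, pvSplitSp, PySem.Chars.join_nil]
  | cons c cs ih =>
      by_cases hc : c = ' '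
      · subst hc
        simp only [pvF, ih, pvJ_space, List.head?_cons]
        simp
      · have hJc : pvJ (c :: cs)
            = c :: ((if decide (cs.head? = some ' ') && !(pvJ cs).isEmpty then [' '] else [])
                ++ pvJ cs) := pvJ_cons c cs hc
        rw [pvF, if_neg hc, ih false true, hJc]
        simp only [List.head?_cons]
        cases p <;> cases st <;> simp [hc]

theorem pvA_fold (xs : List String) (s0 : Int) (acc : List String) :
    (PySem.List.enumerate xs s0).foldl
        (fun acc p => if 0 < PySem.Str.len p.2 then acc ++ [p.2] else acc) acc
      = acc ++ xs.filter (fun w => decide (0 < PySem.Str.len w)) := by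
  induction xs generalizing s0 acc with
  | nil => simp [PySem.List.enumerate_nil]
  | cons x xs ih =>
      rw [PySem.List.enumerate_cons, List.foldl_cons]
      by_cases hx : 0 < PySem.Str.len x
      · have hd : (decide (0 < PySem.Str.len x)) = true := decide_eq_true hx
        rw [if_pos hx, ih]
        simp only [List.filter_cons, hd]
        simp
      · have hd : (decide (0 < PySem.Str.len x)) = false := decide_eq_false hx
        rw [if_neg hx, ih]
        simp only [List.filter_cons, hd]
        simp

theorem pvB_fold (cs : List Char) (out : List Char) (p : Bool) :
    (cs.foldl
        (fun (st : List Char × Bool) c =>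
          if c = ' ' then (st.1, true)
          else ((if st.2 && !st.1.isEmpty then st.1 ++ [' '] else st.1) ++ [c], false))
        (out, p)).1
      = out ++ pvF cs p (!out.isEmpty) := by
  induction cs generalizing out p with
  | nil => simp [pvF]
  | cons c cs ih =>
      by_cases hc : c = ' '
      · subst hc
        rw [List.foldl_cons, if_pos rfl, ih]
        simp [pvF]
      · rw [List.foldl_cons, if_neg hc, ih]
        have hne : ∀ (l r : List Char) (x : Char), (l ++ x :: r).isEmpty = false := by
          intro l r x; cases l <;> simp
        cases hpe : p && !out.isEmpty <;> simp [pvF, hc, hpe, hne]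

theorem pv_filter_map (l : List (List Char)) :
    (l.map String.ofList).filter (fun w => decide (0 < PySem.Str.len w))
      = (l.filter (fun w => !w.isEmpty)).map String.ofList := by
  rw [List.filter_map]
  congr 1
  apply List.filter_congr
  intro w _
  cases w <;> simp [PySem.Str.len]

theorem pv_main (s : String) :
    PySem.Str.join " "
        ((PySem.List.enumerate ((PySem.Chars.splitOn s.toList " ".toList).map String.ofList)).foldl
          (fun acc p => if 0 < PySem.Str.len p.2 then acc ++ [p.2] else acc) [])
      = String.ofList
          ((s.toList.foldl
              (fun (st : List Char × Bool) c =>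
                if c = ' ' then (st.1, true)
                else ((if st.2 && !st.1.isEmpty then st.1 ++ [' '] else st.1) ++ [c], false))
              ([], false)).1) := by
  rw [pvA_fold, pvB_fold, List.nil_append, List.nil_append]
  rw [show (" ".toList : List Char) = [' '] from rfl]
  rw [pv_filter_map, pv_splitOn_eq]
  rw [show (!(([] : List Char)).isEmpty) = false from rfl]
  rw [pvF_spec s.toList false false]
  simp only [Bool.false_and, if_neg (by simp : ¬((false : Bool) = true)), List.nil_append]
  rw [PySem.Str.join]
  simp only [List.map_map]
  rw [show ((String.toList ∘ String.ofList) : List Char → List Char) = id from by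
    funext w; simp]
  rw [List.map_id, pvJ, pvWords]
  rfl

-- ===== VERDICT (by name: the statement is the Claim_ definition above) =====
theorem fullStrip_spec : Claim_equal_fullStrip := by
  intro str nl _
  unfold Spec_fullStrip fullStrip fullStrip_alt
  exact pv_main _
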